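-- pv_equiv track=rewrite | github.com/LilArveen/Python-Password-Manager-Script-Project | TestFile/test_Functions.py | checkMwP
-- ===== SOURCE A (Python) =====
-- def checkMwP(start_key, key_increment, pwd, checker):
--
--     key = 0
--     encoded = ""
--     for char in pwd:
--         key += ord(char)
--
--     key+=len(pwd)
--     key+= start_key
--
--     for char in pwd:
--         unicode = ord(char)
--         unicode+=key
--         unicode %= 1114111
--         encoded+=chr(unicode)
--         key+= key_increment
--
--     if encoded != checker:
--         return False
--     else:
--         return True
-- ===== SOURCE B (Python) =====
-- def checkMwP(start_key, key_increment, pwd, checker):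
--     # Invert the cipher: decode the checker back and compare it to pwd.
--     if len(checker) != len(pwd):
--         return False
--     base = sum(ord(c) for c in pwd) + len(pwd) + start_key
--     decoded = [chr((ord(ch) - base - i * key_increment) % 1114111)
--                for i, ch in enumerate(checker)]
--     return decoded == list(pwd)
-- ===== Notes on version B (the rewrite author's own statement) =====
-- stated objective: alternative
-- what changed: Instead of encoding pwd with a running key and comparing to checker, B runs the cipher in reverse: it decodes each checker character by subtracting the closed-form offset mod 1114111 and compares the decoded list to pwd (with an explicit length guard).
import Mathlib
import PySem

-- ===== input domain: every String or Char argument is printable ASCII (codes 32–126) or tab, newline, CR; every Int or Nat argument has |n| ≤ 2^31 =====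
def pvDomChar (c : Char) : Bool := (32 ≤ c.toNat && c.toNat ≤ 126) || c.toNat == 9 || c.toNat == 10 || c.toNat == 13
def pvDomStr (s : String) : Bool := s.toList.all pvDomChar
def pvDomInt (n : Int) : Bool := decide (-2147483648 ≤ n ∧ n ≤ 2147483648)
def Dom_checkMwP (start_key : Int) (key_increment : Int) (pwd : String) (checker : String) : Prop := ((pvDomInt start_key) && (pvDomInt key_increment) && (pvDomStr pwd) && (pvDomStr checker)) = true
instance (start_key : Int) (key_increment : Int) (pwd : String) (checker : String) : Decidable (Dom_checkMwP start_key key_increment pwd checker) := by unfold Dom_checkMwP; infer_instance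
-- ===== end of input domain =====

-- B runs the cipher in reverse: it decodes checker (subtracting the closed-form offset
-- mod 1114111 per position) and compares the decoded list to pwd; same cost, inverse direction.
-- Both ports model chr/ord by the code point itself (List Int): Lean's Char excludes
-- surrogates that Python's chr admits; chr is injective on [0, 1114111), so the final
-- string/list equality test is exactly equality of the code-point lists.

-- ===== PORT A =====
-- second loop of A: running key, one encoded code point appended per character
def pvAEncode (inc : Int) : List Char → Int → List Int
  | [], _ => []
  | c :: cs, key => PySem.Int.mod ((c.toNat : Int) + key) 1114111 :: pvAEncode inc cs (key + inc)

def checkMwP (start_key : Int) (key_increment : Int) (pwd : String) (checker : String) : Bool :=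
  -- first loop computes key = sum of ord(char); then key += len(pwd); key += start_key;
  -- then the encoding loop; 'if encoded != checker: return False else: return True'
  decide (pvAEncode key_increment pwd.toList
            (pwd.toList.foldl (fun k c => k + (c.toNat : Int)) 0 + (pwd.toList.length : Int) + start_key)
          = checker.toList.map (fun c => (c.toNat : Int)))

-- ===== PORT B =====
def checkMwP_alt (start_key : Int) (key_increment : Int) (pwd : String) (checker : String) : Bool :=
  -- if len(checker) != len(pwd): return False
  if checker.toList.length ≠ pwd.toList.length then false
  else
    -- base = sum(ord(c) for c in pwd) + len(pwd) + start_key; decode checker, compare to pwd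
    decide ((PySem.List.enumerate checker.toList 0).map
              (fun p => PySem.Int.mod ((p.2.toNat : Int)
                - ((pwd.toList.map (fun c => (c.toNat : Int))).sum + (pwd.toList.length : Int) + start_key)
                - p.1 * key_increment) 1114111)
            = pwd.toList.map (fun c => (c.toNat : Int)))

-- ===== PRECONDITION & SPEC =====
def Spec_checkMwP (start_key : Int) (key_increment : Int) (pwd : String) (checker : String) (out : Bool) : Prop := out = checkMwP_alt start_key key_increment pwd checker
instance (start_key : Int) (key_increment : Int) (pwd : String) (checker : String) (out : Bool) : Decidable (Spec_checkMwP start_key key_increment pwd checker out) := by unfold Spec_checkMwP; infer_instance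

-- ===== CLAIM (what is proved, stated in full; the proofs are below) =====
def Claim_equal_checkMwP : Prop := ∀ (start_key : Int) (key_increment : Int) (pwd : String) (checker : String), Dom_checkMwP start_key key_increment pwd checker → Spec_checkMwP start_key key_increment pwd checker (checkMwP start_key key_increment pwd checker)

-- ===== LEMMAS AND PROOFS =====

-- encode at one position is invertible: shift by k mod M, both values canonical representatives
theorem pv_shift_iff (a b k : Int) (ha0 : 0 ≤ a) (ha1 : a < 1114111)
    (hb0 : 0 ≤ b) (hb1 : b < 1114111) :
    (PySem.Int.mod (a + k) 1114111 = b ↔ PySem.Int.mod (b - k) 1114111 = a) := by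
  rw [PySem.Int.mod_eq_emod_of_pos (by norm_num : (0:Int) < 1114111),
    PySem.Int.mod_eq_emod_of_pos (by norm_num : (0:Int) < 1114111)]
  omega

-- A's encoding (running key) equals the closed-form per-index map
theorem pvAEncode_eq (inc : Int) (cs : List Char) (key : Int) (s : Int) :
    pvAEncode inc cs (key + s * inc) =
      (PySem.List.enumerate cs s).map
        (fun p => PySem.Int.mod ((p.2.toNat : Int) + key + p.1 * inc) 1114111) := by
  induction cs generalizing s with
  | nil => simp [pvAEncode, PySem.List.enumerate_nil]
  | cons c cs ih =>
      rw [pvAEncode, PySem.List.enumerate_cons, List.map_cons]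
      refine List.cons_eq_cons.mpr ⟨by ring_nf, ?_⟩
      have := ih (s + 1)
      rw [show key + s * inc + inc = key + (s + 1) * inc by ring]
      exact this

-- encoding pwd matches checker iff decoding checker matches pwd (chars in ASCII range)
theorem pv_enc_dec_iff (base inc : Int) (ps cs : List Char) (s : Int)
    (hp : ∀ c ∈ ps, c.toNat ≤ 126) (hc : ∀ c ∈ cs, c.toNat ≤ 126) :
    ((PySem.List.enumerate ps s).map
        (fun p => PySem.Int.mod ((p.2.toNat : Int) + base + p.1 * inc) 1114111)
      = cs.map (fun c => (c.toNat : Int)))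
    ↔ ((PySem.List.enumerate cs s).map
        (fun p => PySem.Int.mod ((p.2.toNat : Int) - base - p.1 * inc) 1114111)
      = ps.map (fun c => (c.toNat : Int))) := by
  induction ps generalizing cs s with
  | nil =>
      cases cs with
      | nil => simp [PySem.List.enumerate_nil]
      | cons c cs => simp [PySem.List.enumerate_nil, PySem.List.enumerate_cons]
  | cons p ps ih =>
      cases cs with
      | nil => simp [PySem.List.enumerate_nil, PySem.List.enumerate_cons]
      | cons c cs =>
          simp only [PySem.List.enumerate_cons, List.map_cons, List.cons_eq_cons]
          have hhead :
              (PySem.Int.mod ((p.toNat : Int) + base + s * inc) 1114111 = (c.toNat : Int))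
              ↔ (PySem.Int.mod ((c.toNat : Int) - base - s * inc) 1114111 = (p.toNat : Int)) := by
            have h1 := pv_shift_iff (p.toNat : Int) (c.toNat : Int) (base + s * inc)
              (by positivity) (by have := hp p (by simp); omega)
              (by positivity) (by have := hc c (by simp); omega)
            constructor
            · intro h
              have := h1.mp (by rw [← h]; ring_nf)
              rw [← this]; ring_nf
            · intro h
              have := h1.mpr (by rw [← h]; ring_nf)
              rw [← this]; ring_nf
          have htail := ih cs (s + 1)
            (fun x hx => hp x (by simp [hx])) (fun x hx => hc x (by simp [hx]))
          exact and_congr hhead htail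

theorem pv_sum_foldl (cs : List Char) :
    (cs.map (fun c => (c.toNat : Int))).sum = cs.foldl (fun k c => k + (c.toNat : Int)) 0 := by
  rw [List.sum_eq_foldl, List.foldl_map]

theorem pv_dom_char (s : String) (h : pvDomStr s = true) :
    ∀ c ∈ s.toList, c.toNat ≤ 126 := by
  intro c hc
  have := List.all_eq_true.mp h c hc
  simp [pvDomChar] at this
  omega

-- ===== VERDICT (by name: the statement is the Claim_ definition above) =====
theorem checkMwP_spec : Claim_equal_checkMwP := by
  intro sk ki pwd checker hdom
  unfold Spec_checkMwP checkMwP checkMwP_alt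
  simp only [Dom_checkMwP, Bool.and_eq_true] at hdom
  obtain ⟨⟨⟨-, -⟩, hpwd⟩, hchk⟩ := hdom
  have hkey :
      pwd.toList.foldl (fun k c => k + (c.toNat : Int)) 0 + (pwd.toList.length : Int) + sk
        = ((pwd.toList.map (fun c => (c.toNat : Int))).sum + (pwd.toList.length : Int) + sk)
          + 0 * ki := by
    rw [pv_sum_foldl]; ring
  rw [hkey, pvAEncode_eq]
  by_cases hlen : checker.toList.length = pwd.toList.length
  · simp only [hlen, ne_eq, not_true_eq_false, if_false]
    exact decide_eq_decide.mpr (pv_enc_dec_iff _ ki pwd.toList checker.toList 0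
      (pv_dom_char _ hpwd) (pv_dom_char _ hchk))
  · simp only [ne_eq, hlen, not_false_eq_true, if_true]
    rw [decide_eq_false_iff_not]
    intro h
    apply hlen
    have := congrArg List.length h
    simpa [PySem.List.length_enumerate] using this.symm
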